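-- pv_equiv track=rewrite | github.com/doubleyuhtee/mojimanager | analyze.py | to_user_count_map
-- ===== SOURCE A (Python) =====
-- def to_user_count_map(list):
--     map = {}
--     for entry in list:
--         if entry["user_display_name"] not in map:
--             map[entry["user_display_name"]] = []
--         map[entry["user_display_name"]].append(entry["created"])
--     for e in map.keys():
--         map[e].sort()
--     return map
-- ===== SOURCE B (Python) =====
-- def to_user_count_map(list):
--     # Register keys in first-appearance order (so dict iteration order matches),
--     # then one global stable sort by 'created' replaces the per-group sorts.
--     result = {}
--     for entry in list:
--         result.setdefault(entry["user_display_name"], [])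
--     for entry in sorted(list, key=lambda e: e["created"]):
--         result[entry["user_display_name"]].append(entry["created"])
--     return result
-- ===== Notes on version B (the rewrite author's own statement) =====
-- stated objective: alternative
-- what changed: B replaces A's per-user group-then-sort-each-list with one global stable sort of all entries by 'created' and a single fill pass; a preliminary pass registers each user key at first appearance so the dict's key order is unchanged.
import Mathlib
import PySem

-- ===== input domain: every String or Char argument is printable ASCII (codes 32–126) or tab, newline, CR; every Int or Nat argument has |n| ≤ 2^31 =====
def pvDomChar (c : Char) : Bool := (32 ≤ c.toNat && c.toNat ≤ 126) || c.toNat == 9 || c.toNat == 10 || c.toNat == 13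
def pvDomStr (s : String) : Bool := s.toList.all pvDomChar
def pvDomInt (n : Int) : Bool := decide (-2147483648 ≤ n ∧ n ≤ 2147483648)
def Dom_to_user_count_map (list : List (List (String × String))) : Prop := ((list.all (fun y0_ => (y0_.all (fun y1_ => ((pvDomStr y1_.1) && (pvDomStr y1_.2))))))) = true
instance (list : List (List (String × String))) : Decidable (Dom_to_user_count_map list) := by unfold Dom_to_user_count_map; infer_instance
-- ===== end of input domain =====

-- B replaces A's per-user group-then-sort-each-list with ONE global stable sort by 'created' and a
-- single fill pass (a preliminary pass registers keys in first-appearance order); alternative algorithm, same cost.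

-- entry["user_display_name"] / entry["created"]: first-match lookup in the entry dict; the "" default is
-- never reached under Pre_to_user_count_map (Python raises KeyError exactly there).
def pvName (e : List (String × String)) : String := (PySem.Dict.mk e).getD "user_display_name" ""
def pvCreated (e : List (String × String)) : String := (PySem.Dict.mk e).getD "created" ""

-- ===== PORT A =====
def to_user_count_map (list : List (List (String × String))) : List (String × List String) :=
  (list.foldl
      (fun m entry =>
        (if m.contains (pvName entry) then m else m.insert (pvName entry) ([] : List String)).modify
          (pvName entry) [] (fun v => v ++ [pvCreated entry]))
      PySem.Dict.empty).items.map
    (fun p => (p.1, PySem.List.sorted p.2 (fun x => x)))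

-- ===== PORT B =====
def to_user_count_map_alt (list : List (List (String × String))) : List (String × List String) :=
  ((PySem.List.sorted list pvCreated).foldl
      (fun m entry => m.modify (pvName entry) [] (fun v => v ++ [pvCreated entry]))
      (list.foldl (fun m entry => m.setdefault (pvName entry) ([] : List String)) PySem.Dict.empty)).items

-- ===== PRECONDITION & SPEC =====
-- Pre_ excludes exactly the inputs where Python A raises KeyError: an entry lacking the
-- "user_display_name" or "created" key.
def Pre_to_user_count_map (list : List (List (String × String))) : Prop :=
  ∀ e ∈ list, (PySem.Dict.mk e).contains "user_display_name" = true ∧ (PySem.Dict.mk e).contains "created" = true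
instance (list : List (List (String × String))) : Decidable (Pre_to_user_count_map list) := by unfold Pre_to_user_count_map; infer_instance
def pvWitness_to_user_count_map : (List (List (String × String))) :=
  [[("user_display_name", "alice"), ("created", "2020-01-02")],
   [("user_display_name", "bob"), ("created", "2020-01-01")],
   [("user_display_name", "alice"), ("created", "2019-12-31")]]

def Spec_to_user_count_map (list : List (List (String × String))) (out : List (String × List String)) : Prop := out = to_user_count_map_alt list
instance (list : List (List (String × String))) (out : List (String × List String)) : Decidable (Spec_to_user_count_map list out) := by unfold Spec_to_user_count_map; infer_instance

-- ===== CLAIM (what is proved, stated in full; the proofs are below) =====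
def Claim_equal_to_user_count_map : Prop := ∀ (list : List (List (String × String))), Dom_to_user_count_map list → Pre_to_user_count_map list → Spec_to_user_count_map list (to_user_count_map list)

-- ===== LEMMAS AND PROOFS =====

-- the created-stamps of u's entries, in the order they occur in l
def pvVals (u : String) (l : List (List (String × String))) : List String :=
  (l.filter (fun e => pvName e == u)).map pvCreated

-- A's branch 'if name not in map: map[name] = []' followed by the append is one modify
lemma stepA_eq_modify (m : PySem.Dict String (List String)) (e : List (String × String)) :
    (if m.contains (pvName e) then m else m.insert (pvName e) ([] : List String)).modify
        (pvName e) [] (fun v => v ++ [pvCreated e])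
      = m.modify (pvName e) [] (fun v => v ++ [pvCreated e]) := by
  by_cases h : m.contains (pvName e) = true
  · simp [h]
  · simp only [Bool.not_eq_true] at h
    rw [if_neg (by simp [h])]
    have hany : (m.items.any fun p => p.1 == pvName e) = false := h
    have hmap : ∀ p ∈ m.items, (p.1 == pvName e) = false := by
      simpa [List.any_eq_false] using hany
    have hfind : m.items.find? (fun p => p.1 == pvName e) = none := List.find?_eq_none.mpr (by
      intro p hp; simp [hmap p hp])
    simp [PySem.Dict.modify, PySem.Dict.insert, PySem.Dict.contains, PySem.Dict.get?,
      PySem.Dict.getD, hany, hfind, List.find?_append]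
    conv_rhs => rw [← List.map_id m.items]
    apply List.map_congr_left
    intro p hp
    have h2 := hmap p hp
    simp only [beq_eq_false_iff_ne, ne_eq] at h2
    simp [h2]

lemma foldl_modify_getD (l : List (List (String × String))) (d : PySem.Dict String (List String)) (u : String) :
    (l.foldl (fun m e => m.modify (pvName e) [] (fun v => v ++ [pvCreated e])) d).getD u []
      = d.getD u [] ++ pvVals u l := by
  have h := PySem.Dict.getD_foldl_modify_append (l.map (fun e => (pvName e, pvCreated e))) d u
  rw [List.foldl_map] at h
  simpa [pvVals, List.filter_map, List.map_map, Function.comp] using h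

lemma setdefault_keys_add (d : PySem.Dict String (List String)) (k : String) :
    (d.setdefault k ([] : List String)).keys = PySem.Set.add d.keys k := by
  rw [PySem.Dict.keys_setdefault, PySem.Dict.contains_eq_decide_mem_keys]
  by_cases h : k ∈ d.keys <;> simp [h, PySem.Set.add]

lemma foldl_setdefault_keys (l : List (List (String × String))) (d : PySem.Dict String (List String)) :
    (l.foldl (fun m e => m.setdefault (pvName e) ([] : List String)) d).keys
      = PySem.Set.update d.keys (l.map pvName) := by
  induction l generalizing d with
  | nil => rfl
  | cons e l ih =>
      show (l.foldl _ (d.setdefault (pvName e) [])).keys = PySem.Set.update d.keys (pvName e :: l.map pvName)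
      rw [ih, setdefault_keys_add]
      rfl
  
lemma foldl_setdefault_getD (l : List (List (String × String))) (d : PySem.Dict String (List String)) (u : String) :
    (l.foldl (fun m e => m.setdefault (pvName e) ([] : List String)) d).getD u []
      = d.getD u [] := by
  induction l generalizing d with
  | nil => rfl
  | cons e l ih =>
      rw [List.foldl_cons, ih]
      by_cases h : u = pvName e
      · subst h; rw [PySem.Dict.getD_setdefault_self]
      · rw [PySem.Dict.getD_eq_get?_getD, PySem.Dict.get?_setdefault_of_ne _ _ h,
          ← PySem.Dict.getD_eq_get?_getD]

lemma update_of_subset (l s : List String) (h : ∀ a ∈ l, a ∈ s) : PySem.Set.update s l = s := by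
  induction l generalizing s with
  | nil => rfl
  | cons x l ih =>
      show PySem.Set.update (PySem.Set.add s x) l = s
      rw [PySem.Set.add_of_mem (h x (by simp)), ih]
      exact fun a ha => h a (by simp [ha])

-- the heart: sorting a user's stamps = filtering the globally created-sorted list
lemma sorted_vals (u : String) (l : List (List (String × String))) :
    PySem.List.sorted (pvVals u l) (fun x => x) = pvVals u (PySem.List.sorted l pvCreated) := by
  apply PySem.List.sorted_id_eq_of_perm_of_pairwise
  · exact (((PySem.List.sorted_perm l pvCreated false).filter _).map _)
  · have hp : List.Pairwise (fun a b => pvCreated a ≤ pvCreated b) (PySem.List.sorted l pvCreated) :=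
      PySem.List.sorted_pairwise l pvCreated
    have hs := hp.sublist (List.filter_sublist (l := PySem.List.sorted l pvCreated)
      (p := fun e => pvName e == u))
    exact List.pairwise_map.mpr hs

theorem to_user_count_map_eq (list : List (List (String × String))) :
    to_user_count_map list = to_user_count_map_alt list := by
  unfold to_user_count_map to_user_count_map_alt
  -- rewrite A's loop body to a bare modify
  rw [List.foldl_ext _ (fun m e => m.modify (pvName e) [] (fun v => v ++ [pvCreated e]))
    PySem.Dict.empty (fun m e _ => stepA_eq_modify m e)]
  -- names of both dicts, with Nodup
  have hAkeys : (list.foldl (fun m e => m.modify (pvName e) [] (fun v => v ++ [pvCreated e]))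
      PySem.Dict.empty).keys = PySem.Set.update [] (list.map pvName) := by
    simpa using PySem.Dict.keys_foldl_modify_key list pvName []
      (fun _ e v => v ++ [pvCreated e]) PySem.Dict.empty
  have hAnodup := PySem.Dict.nodup_keys_foldl_modify_key list pvName []
    (fun _ e v => v ++ [pvCreated e]) PySem.Dict.empty (by simp [PySem.Dict.keys_empty])
  have hm0keys : (list.foldl (fun m e => m.setdefault (pvName e) ([] : List String))
      PySem.Dict.empty).keys = PySem.Set.update [] (list.map pvName) := by
    simpa using foldl_setdefault_keys list PySem.Dict.empty
  have hBkeys : ((PySem.List.sorted list pvCreated).foldl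
      (fun m e => m.modify (pvName e) [] (fun v => v ++ [pvCreated e]))
      (list.foldl (fun m e => m.setdefault (pvName e) ([] : List String)) PySem.Dict.empty)).keys
      = PySem.Set.update [] (list.map pvName) := by
    rw [PySem.Dict.keys_foldl_modify_key (PySem.List.sorted list pvCreated) pvName []
      (fun _ e v => v ++ [pvCreated e]), hm0keys]
    apply update_of_subset
    intro a ha
    rcases List.mem_map.mp ha with ⟨e, he, rfl⟩
    have : e ∈ list := (PySem.List.mem_sorted _ _ _ _).mp he
    have : pvName e ∈ list.map pvName := List.mem_map_of_mem this
    change pvName e ∈ PySem.Set.ofList (list.map pvName)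
    exact (PySem.Set.mem_ofList _ _).mpr this
  have hBnodup := PySem.Dict.nodup_keys_foldl_modify_key (PySem.List.sorted list pvCreated) pvName []
    (fun _ e v => v ++ [pvCreated e])
    (list.foldl (fun m e => m.setdefault (pvName e) ([] : List String)) PySem.Dict.empty)
    (by rw [hm0keys]; change (PySem.Set.ofList _).Nodup; exact PySem.Set.nodup_ofList _)
  rw [PySem.Dict.items_eq_map_keys _ hAnodup [], PySem.Dict.items_eq_map_keys _ hBnodup []]
  rw [hAkeys, hBkeys, List.map_map]
  apply List.map_congr_left
  intro u _
  simp only [Function.comp]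
  congr 1
  rw [foldl_modify_getD, foldl_modify_getD, foldl_setdefault_getD]
  simp [PySem.Dict.getD_empty, sorted_vals]

-- ===== VERDICT (by name: the statement is the Claim_ definition above) =====
theorem to_user_count_map_spec : Claim_equal_to_user_count_map := by
  intro list _ _
  exact to_user_count_map_eq list
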